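-- pv_equiv track=rewrite | github.com/Ansidrake/Rsi_divergence | functions.py | calculate_pivot_indexes
-- ===== SOURCE A (Python) =====
-- def calculate_pivot_indexes(pivot):
--     pivot_index_prev = [0] * len(pivot)
--     pivot_index_next = [0] * len(pivot)
--     for i in range(len(pivot)):
--         if pivot[i] is None and i > 0:
--             pivot_index_prev[i] = pivot_index_prev[i - 1]
--         else:
--             pivot_index_prev[i], pivot_index_next[i] = i, i
--     for i in range(len(pivot) - 1, -1, -1):
--         flag = False
--         if pivot[i] is not None:
--             if flag and i < len(pivot) - 1:
--                 pivot_index_prev[i], pivot_index_next[i] = i, pivot_index_next[i + 1]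
--             else:
--                 pivot_index_prev[i], pivot_index_next[i] = i, i
--                 flag = True
--         elif i < len(pivot) - 1:
--             pivot_index_next[i] = pivot_index_next[i + 1]
--     return pivot_index_prev, pivot_index_next
-- ===== SOURCE B (Python) =====
-- def calculate_pivot_indexes(pivot):
--     n = len(pivot)
--     piv = [i for i, v in enumerate(pivot) if v is not None]
--     if not piv:
--         return [0] * n, [0] * n
--     prev = [0] * piv[0]
--     nxt = [piv[0]] * (piv[0] + 1)
--     for p, q in zip(piv, piv[1:]):
--         prev += [p] * (q - p)
--         nxt += [q] * (q - p)
--     prev += [piv[-1]] * (n - piv[-1])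
--     nxt += [0] * (n - 1 - piv[-1])
--     return prev, nxt
-- ===== Notes on version B (the rewrite author's own statement) =====
-- stated objective: alternative
-- what changed: B first extracts the list of non-None pivot positions, then builds both output arrays by concatenating constant blocks between consecutive pivot positions, instead of A's per-index forward and backward carry passes over index arrays with a dead flag.
import Mathlib
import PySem

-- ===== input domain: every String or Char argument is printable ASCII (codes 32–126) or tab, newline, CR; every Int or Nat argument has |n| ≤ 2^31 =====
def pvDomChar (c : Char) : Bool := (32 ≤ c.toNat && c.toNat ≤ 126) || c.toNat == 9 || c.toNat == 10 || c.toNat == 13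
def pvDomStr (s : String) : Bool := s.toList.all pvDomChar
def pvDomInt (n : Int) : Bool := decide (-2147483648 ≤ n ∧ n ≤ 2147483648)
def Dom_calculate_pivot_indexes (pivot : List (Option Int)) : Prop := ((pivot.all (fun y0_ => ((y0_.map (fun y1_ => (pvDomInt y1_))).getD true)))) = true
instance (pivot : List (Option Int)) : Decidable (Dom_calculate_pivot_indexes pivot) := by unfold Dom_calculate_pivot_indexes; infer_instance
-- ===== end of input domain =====

-- B replaces A's per-index forward and backward carry passes by a different
-- algorithm: it first extracts the list of non-None pivot positions, then builds
-- both output arrays by concatenating constant blocks between consecutive pivot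
-- positions, by recursion over that position list (objective: alternative).

-- ===== PORT A =====
-- pivot[i] for an in-range loop index (range(len(pivot)) guarantees i < len)
def pvAt (pivot : List (Option Int)) (i : Nat) : Option Int := pivot.getD i none

-- body of A's forward loop at index i (state = (pivot_index_prev, pivot_index_next))
def aStepF (pivot : List (Option Int)) (i : Nat) (st : List Int × List Int) : List Int × List Int :=
  if pvAt pivot i = none ∧ i > 0 then
    (st.1.set i (st.1.getD (i - 1) 0), st.2)
  else
    (st.1.set i (i : Int), st.2.set i (i : Int))

-- `for i in range(n)` as structural recursion: aFwd n runs i = 0 .. n-1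
def aFwd (pivot : List (Option Int)) : Nat → List Int × List Int → List Int × List Int
  | 0, st => st
  | k + 1, st => aStepF pivot k (aFwd pivot k st)

-- body of A's backward loop at index i, including the (always-false) `flag`
def aStepB (pivot : List (Option Int)) (n i : Nat) (st : List Int × List Int) : List Int × List Int :=
  let flag := false
  if pvAt pivot i ≠ none then
    if flag = true ∧ i < n - 1 then (st.1.set i (i : Int), st.2.set i (st.2.getD (i + 1) 0))
    else (st.1.set i (i : Int), st.2.set i (i : Int))
  else if i < n - 1 then (st.1, st.2.set i (st.2.getD (i + 1) 0))
  else st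

-- `for i in range(n-1, -1, -1)` as structural recursion: aBack n runs i = n-1 .. 0
def aBack (pivot : List (Option Int)) (n : Nat) : Nat → List Int × List Int → List Int × List Int
  | 0, st => st
  | k + 1, st => aBack pivot n k (aStepB pivot n k st)

def calculate_pivot_indexes (pivot : List (Option Int)) : List Int × List Int :=
  let n := pivot.length
  aBack pivot n n (aFwd pivot n (List.replicate n 0, List.replicate n 0))

-- ===== PORT B =====
-- piv = [i for i, v in enumerate(pivot) if v is not None]
def pivotIdxs (pivot : List (Option Int)) : List Nat :=
  pivot.zipIdx.filterMap (fun vi => if vi.1.isSome then some vi.2 else none)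

-- one loop step: append one constant block [p]*(q-p) to prev and [q]*(q-p) to next
def altStep (st : List Int × List Int) (pq : Nat × Nat) : List Int × List Int :=
  (st.1 ++ List.replicate (pq.2 - pq.1) ((pq.1 : Nat) : Int),
   st.2 ++ List.replicate (pq.2 - pq.1) ((pq.2 : Nat) : Int))

def calculate_pivot_indexes_alt (pivot : List (Option Int)) : List Int × List Int :=
  match pivotIdxs pivot with
  | [] => (List.replicate pivot.length 0, List.replicate pivot.length 0)
  | p0 :: rest =>
    -- for p, q in zip(piv, piv[1:]): append the blocks; then the tail pieces after piv[-1]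
    ((((p0 :: rest).zip rest).foldl altStep
        (List.replicate p0 0, List.replicate (p0 + 1) (p0 : Int))).1 ++
      List.replicate (pivot.length - (p0 :: rest).getLast (List.cons_ne_nil _ _))
        (((p0 :: rest).getLast (List.cons_ne_nil _ _) : Nat) : Int),
     (((p0 :: rest).zip rest).foldl altStep
        (List.replicate p0 0, List.replicate (p0 + 1) (p0 : Int))).2 ++
      List.replicate (pivot.length - 1 - (p0 :: rest).getLast (List.cons_ne_nil _ _)) 0)

-- ===== PRECONDITION & SPEC =====
def Spec_calculate_pivot_indexes (pivot : List (Option Int)) (out : List Int × List Int) : Prop := out = calculate_pivot_indexes_alt pivot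
instance (pivot : List (Option Int)) (out : List Int × List Int) : Decidable (Spec_calculate_pivot_indexes pivot out) := by unfold Spec_calculate_pivot_indexes; infer_instance

-- ===== CLAIM (what is proved, stated in full; the proofs are below) =====
def Claim_equal_calculate_pivot_indexes : Prop := ∀ (pivot : List (Option Int)), Dom_calculate_pivot_indexes pivot → Spec_calculate_pivot_indexes pivot (calculate_pivot_indexes pivot)

-- ===== LEMMAS AND PROOFS =====

-- closed form of the prev array: last non-None index ≤ i (0 if none)
def pf (pivot : List (Option Int)) : Nat → Int
  | 0 => 0
  | i + 1 => if pvAt pivot (i + 1) = none then pf pivot i else (i + 1 : Nat)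

-- value A's forward loop leaves in pivot_index_next[i]
def qf (pivot : List (Option Int)) (i : Nat) : Int :=
  if pvAt pivot i = none ∧ i > 0 then 0 else (i : Int)

-- closed form of the next array: next non-None index ≥ i (0 if none)
def nf (pivot : List (Option Int)) (n : Nat) (i : Nat) : Int :=
  if pvAt pivot i ≠ none then (i : Int)
  else if i < n - 1 then nf pivot n (i + 1)
  else 0
termination_by n - i
decreasing_by omega

-- setting the element just after a length-k prefix
lemma set_at_len {α : Type} (A : List α) (b v : α) (B : List α) :
    (A ++ b :: B).set A.length v = A ++ v :: B := by
  induction A with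
  | nil => simp
  | cons a A ih => simp [ih]

lemma getD_map_range (f : Nat → Int) (k i : Nat) (h : i < k) (B : List Int) (d : Int) :
    ((List.range k).map f ++ B).getD i d = f i := by
  rw [List.getD_eq_getElem?_getD, List.getElem?_append_left (by simpa using h)]
  simp [List.getElem?_range h]

lemma getD_append_len {α : Type} (A B : List α) (d : α) :
    (A ++ B).getD A.length d = B.getD 0 d := by
  rw [List.getD_eq_getElem?_getD, List.getElem?_append_right le_rfl]
  simp [List.getD_eq_getElem?_getD]

lemma fwd_inv (pivot : List (Option Int)) (k : Nat) (hk : k ≤ pivot.length) :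
    aFwd pivot k (List.replicate pivot.length 0, List.replicate pivot.length 0) =
      ((List.range k).map (pf pivot) ++ List.replicate (pivot.length - k) 0,
       (List.range k).map (qf pivot) ++ List.replicate (pivot.length - k) 0) := by
  induction k with
  | zero => simp [aFwd]
  | succ k ih =>
    have hkl : k < pivot.length := by omega
    have hrep : List.replicate (pivot.length - k) (0 : Int) =
        0 :: List.replicate (pivot.length - (k + 1)) 0 := by
      rw [show pivot.length - k = (pivot.length - (k + 1)) + 1 from by omega, List.replicate_succ]
    have hlenP : ((List.range k).map (pf pivot)).length = k := by simp
    have hlenQ : ((List.range k).map (qf pivot)).length = k := by simp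
    rw [aFwd, ih (by omega), hrep, aStepF]
    by_cases hc : pvAt pivot k = none ∧ k > 0
    · rw [if_pos hc]
      obtain ⟨hnone, hpos⟩ := hc
      have hget : (((List.range k).map (pf pivot) ++
          0 :: List.replicate (pivot.length - (k + 1)) 0).getD (k - 1) 0) = pf pivot (k - 1) :=
        getD_map_range (pf pivot) k (k - 1) (by omega) _ 0
      have hpfk : pf pivot (k - 1) = pf pivot k := by
        obtain ⟨j, rfl⟩ : ∃ j, k = j + 1 := ⟨k - 1, by omega⟩
        simp [pf, hnone]
      have hset := set_at_len ((List.range k).map (pf pivot)) (0 : Int) (pf pivot k)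
        (List.replicate (pivot.length - (k + 1)) 0)
      rw [hlenP] at hset
      have hqfk : qf pivot k = 0 := by rw [qf, if_pos ⟨hnone, hpos⟩]
      simp only [hget, hpfk, hset]
      simp [List.range_succ, hqfk]
    · rw [if_neg hc]
      have hpfk : pf pivot k = (k : Int) := by
        rcases Nat.eq_zero_or_pos k with h0 | h0
        · subst h0; simp [pf]
        · obtain ⟨j, rfl⟩ : ∃ j, k = j + 1 := ⟨k - 1, by omega⟩
          have hs : ¬ pvAt pivot (j + 1) = none := by tauto
          simp [pf, hs]
      have hqfk : qf pivot k = (k : Int) := by rw [qf, if_neg hc]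
      have hsetP := set_at_len ((List.range k).map (pf pivot)) (0 : Int) ((k : Int))
        (List.replicate (pivot.length - (k + 1)) 0)
      have hsetQ := set_at_len ((List.range k).map (qf pivot)) (0 : Int) ((k : Int))
        (List.replicate (pivot.length - (k + 1)) 0)
      rw [hlenP] at hsetP
      rw [hlenQ] at hsetQ
      simp only [hsetP, hsetQ]
      simp [List.range_succ, hpfk, hqfk]

lemma back_inv (pivot : List (Option Int)) (k : Nat) (hk : k ≤ pivot.length) :
    aBack pivot pivot.length k
      ((List.range pivot.length).map (pf pivot),
       (List.range k).map (qf pivot) ++ (List.range' k (pivot.length - k)).map (nf pivot pivot.length)) =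
      ((List.range pivot.length).map (pf pivot),
       (List.range pivot.length).map (nf pivot pivot.length)) := by
  induction k with
  | zero => rw [aBack]; rw [show (0 : Nat) = Nat.zero from rfl]; simp [← List.range_eq_range']
  | succ k ih =>
    have hkl : k < pivot.length := by omega
    have hlenQ : ((List.range k).map (qf pivot)).length = k := by simp
    -- peel index k off both prefix and suffix
    have hQsplit : (List.range (k + 1)).map (qf pivot) ++
        (List.range' (k + 1) (pivot.length - (k + 1))).map (nf pivot pivot.length) =
        (List.range k).map (qf pivot) ++ qf pivot k ::
          (List.range' (k + 1) (pivot.length - (k + 1))).map (nf pivot pivot.length) := by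
      rw [List.range_succ, List.map_append]; simp
    have hTsplit : (List.range' k (pivot.length - k)).map (nf pivot pivot.length) =
        nf pivot pivot.length k ::
          (List.range' (k + 1) (pivot.length - (k + 1))).map (nf pivot pivot.length) := by
      rw [show pivot.length - k = (pivot.length - (k + 1)) + 1 from by omega, List.range'_succ]
      simp
    rw [aBack, hQsplit]
    have hstep : aStepB pivot pivot.length k
        ((List.range pivot.length).map (pf pivot),
         (List.range k).map (qf pivot) ++ qf pivot k ::
           (List.range' (k + 1) (pivot.length - (k + 1))).map (nf pivot pivot.length)) =
        ((List.range pivot.length).map (pf pivot),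
         (List.range k).map (qf pivot) ++
           (List.range' k (pivot.length - k)).map (nf pivot pivot.length)) := by
      rw [hTsplit, aStepB]
      have hsetQ := set_at_len ((List.range k).map (qf pivot)) (qf pivot k)
      by_cases hs : pvAt pivot k ≠ none
      · rw [if_pos hs]
        simp only [Bool.false_eq_true, false_and, if_false]
        have hnfk : nf pivot pivot.length k = (k : Int) := by rw [nf, if_pos hs]
        have hPset : ((List.range pivot.length).map (pf pivot)).set k (k : Int) =
            (List.range pivot.length).map (pf pivot) := by
          apply List.ext_getElem (by simp)
          intro i h1 h2
          simp only [List.getElem_set]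
          split
          · next h =>
            subst h
            have : pf pivot k = (k : Int) := by
              rcases Nat.eq_zero_or_pos k with h0 | h0
              · subst h0; simp [pf]
              · obtain ⟨j, rfl⟩ : ∃ j, k = j + 1 := ⟨k - 1, by omega⟩
                simp [pf, hs]
            simp [this, List.getElem_range]
          · rfl
        have hQset := set_at_len ((List.range k).map (qf pivot)) (qf pivot k) ((k : Int))
          ((List.range' (k + 1) (pivot.length - (k + 1))).map (nf pivot pivot.length))
        rw [hlenQ] at hQset
        simp only [hQset, hPset, hnfk]
      · rw [if_neg hs]
        push Not at hs
        by_cases hlt : k < pivot.length - 1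
        · rw [if_pos hlt]
          have hgetD : (((List.range k).map (qf pivot) ++ qf pivot k ::
              (List.range' (k + 1) (pivot.length - (k + 1))).map (nf pivot pivot.length)).getD (k + 1) 0) =
              nf pivot pivot.length (k + 1) := by
            have h1 : ((List.range k).map (qf pivot) ++ qf pivot k ::
                (List.range' (k + 1) (pivot.length - (k + 1))).map (nf pivot pivot.length)) =
                ((List.range k).map (qf pivot) ++ [qf pivot k]) ++
                (List.range' (k + 1) (pivot.length - (k + 1))).map (nf pivot pivot.length) := by simp
            have h2 : ((List.range k).map (qf pivot) ++ [qf pivot k]).length = k + 1 := by simp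
            have h3 := getD_append_len ((List.range k).map (qf pivot) ++ [qf pivot k])
              ((List.range' (k + 1) (pivot.length - (k + 1))).map (nf pivot pivot.length)) 0
            rw [h2] at h3
            rw [h1, h3]
            rw [show pivot.length - (k + 1) = (pivot.length - (k + 2)) + 1 from by omega,
              List.range'_succ]
            simp
          have hnfk : nf pivot pivot.length k = nf pivot pivot.length (k + 1) := by
            rw [nf, if_neg (by simpa using hs), if_pos hlt]
          have hQset := set_at_len ((List.range k).map (qf pivot)) (qf pivot k)
            (nf pivot pivot.length (k + 1))
            ((List.range' (k + 1) (pivot.length - (k + 1))).map (nf pivot pivot.length))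
          rw [hlenQ] at hQset
          simp only [hgetD, hQset, hnfk]
        · rw [if_neg hlt]
          have hk1 : k = pivot.length - 1 := by omega
          have hnfk : nf pivot pivot.length k = 0 := by
            rw [nf, if_neg (by simpa using hs), if_neg hlt]
          have hqfk : qf pivot k = 0 := by
            rw [qf]
            rcases Nat.eq_zero_or_pos k with h0 | h0
            · subst h0; simp
            · rw [if_pos ⟨hs, h0⟩]
          have hempty : pivot.length - (k + 1) = 0 := by omega
          rw [hempty, hnfk, hqfk]
    rw [hstep, ih (by omega)]

-- ---- B-side lemmas ----

-- closed-form block recursions the loop of B unfolds to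
def prevBlocks (n : Nat) : List Nat → List Int
  | [] => []
  | [p] => List.replicate (n - p) (p : Int)
  | p :: q :: rest => List.replicate (q - p) (p : Int) ++ prevBlocks n (q :: rest)

def nextBlocks (n : Nat) : List Nat → List Int
  | [] => []
  | [p] => List.replicate (n - 1 - p) 0
  | p :: q :: rest => List.replicate (q - p) (q : Int) ++ nextBlocks n (q :: rest)

lemma blocks_bridge (n : Nat) : ∀ (rest : List Nat) (p0 : Nat) (A B : List Int),
    ((((p0 :: rest).zip rest).foldl altStep (A, B)).1 ++
        List.replicate (n - (p0 :: rest).getLast (List.cons_ne_nil _ _))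
          (((p0 :: rest).getLast (List.cons_ne_nil _ _) : Nat) : Int),
     (((p0 :: rest).zip rest).foldl altStep (A, B)).2 ++
        List.replicate (n - 1 - (p0 :: rest).getLast (List.cons_ne_nil _ _)) 0) =
    (A ++ prevBlocks n (p0 :: rest), B ++ nextBlocks n (p0 :: rest)) := by
  intro rest
  induction rest with
  | nil => intro p0 A B; simp [prevBlocks, nextBlocks]
  | cons q rest ih =>
    intro p0 A B
    have hzip : (p0 :: q :: rest).zip (q :: rest) = (p0, q) :: (q :: rest).zip rest := by
      simp [List.zip]
    have hlast : (p0 :: q :: rest).getLast (List.cons_ne_nil _ _) =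
        (q :: rest).getLast (List.cons_ne_nil _ _) := by
      simp [List.getLast]
    rw [hzip, List.foldl_cons, hlast]
    rw [show altStep (A, B) (p0, q) =
        (A ++ List.replicate (q - p0) (p0 : Int), B ++ List.replicate (q - p0) (q : Int)) from rfl]
    rw [ih q (A ++ List.replicate (q - p0) (p0 : Int)) (B ++ List.replicate (q - p0) (q : Int))]
    rw [prevBlocks, nextBlocks]
    simp [List.append_assoc]


-- the pivot-membership predicate B's extraction filters on
def pvf (pivot : List (Option Int)) (i : Nat) : Bool := (pvAt pivot i).isSome

lemma zipIdx_filterMap (l : List (Option Int)) (k : Nat) :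
    (l.zipIdx k).filterMap (fun vi => if vi.1.isSome then some vi.2 else none) =
      (List.range' k l.length).filter (fun i => (l.getD (i - k) none).isSome) := by
  induction l generalizing k with
  | nil => simp
  | cons v rest ih =>
    have hsplit : List.range' k (v :: rest).length = k :: List.range' (k + 1) rest.length := by
      simp [List.range'_succ]
    have htail : (List.range' (k + 1) rest.length).filter
        (fun i => ((v :: rest).getD (i - k) none).isSome) =
        (List.range' (k + 1) rest.length).filter (fun i => (rest.getD (i - (k + 1)) none).isSome) := by
      apply List.filter_congr
      intro i hi
      have hk : k + 1 ≤ i := (List.mem_range'_1.mp hi).1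
      have : i - k = (i - (k + 1)) + 1 := by omega
      rw [this]
      simp
    rw [hsplit, List.zipIdx_cons, List.filterMap_cons, List.filter_cons, htail, ih (k + 1)]
    cases h : v.isSome <;> simp [h]

lemma pivotIdxs_eq (pivot : List (Option Int)) :
    pivotIdxs pivot = (List.range' 0 pivot.length).filter (pvf pivot) := by
  rw [pivotIdxs, zipIdx_filterMap]
  apply List.filter_congr
  intro i _
  simp [pvf, pvAt]

-- split a filtered range at its first element
lemma filter_range'_split (f : Nat → Bool) (k : Nat) : ∀ (a : Nat),
    (List.range' a k).filter f = [] ∨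
      ∃ d, d < k ∧ (∀ j, j < d → f (a + j) = false) ∧ f (a + d) = true ∧
        (List.range' a k).filter f = (a + d) :: (List.range' (a + d + 1) (k - d - 1)).filter f := by
  induction k with
  | zero => intro a; left; simp
  | succ k ih =>
    intro a
    rw [List.range'_succ, List.filter_cons]
    cases hfa : f a
    · simp only [Bool.false_eq_true, if_false]
      rcases ih (a + 1) with h | ⟨d, hd, hnone, hfd, heq⟩
      · left; exact h
      · right
        refine ⟨d + 1, by omega, ?_, ?_, ?_⟩
        · intro j hj
          rcases Nat.eq_zero_or_pos j with h0 | h0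
          · subst h0; simpa using hfa
          · obtain ⟨j', rfl⟩ : ∃ j', j = j' + 1 := ⟨j - 1, by omega⟩
            rw [show a + (j' + 1) = a + 1 + j' from by omega]
            exact hnone j' (by omega)
        · rw [show a + (d + 1) = a + 1 + d from by omega]; exact hfd
        · rw [heq, show a + (d + 1) = a + 1 + d from by omega,
            show k + 1 - (d + 1) - 1 = k - d - 1 from by omega]
    · right
      refine ⟨0, by omega, fun j hj => absurd hj (by omega), by simpa using hfa, ?_⟩
      simp

lemma filter_empty_none (pivot : List (Option Int)) (a k : Nat)
    (h : (List.range' a k).filter (pvf pivot) = []) :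
    ∀ j, a ≤ j → j < a + k → pvAt pivot j = none := by
  intro j h1 h2
  have := (List.filter_eq_nil_iff.mp h) j (List.mem_range'_1.mpr ⟨h1, h2⟩)
  simpa [pvf] using this

lemma pf_pivot (pivot : List (Option Int)) (p : Nat) (hp : pvf pivot p = true) :
    pf pivot p = (p : Int) := by
  rcases Nat.eq_zero_or_pos p with h0 | h0
  · subst h0; simp [pf]
  · obtain ⟨j, rfl⟩ : ∃ j, p = j + 1 := ⟨p - 1, by omega⟩
    have : ¬ pvAt pivot (j + 1) = none := by
      simp only [pvf, Option.isSome_iff_ne_none] at hp; exact hp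
    simp [pf, this]

lemma pf_const (pivot : List (Option Int)) (p : Nat) : ∀ (i : Nat), p ≤ i →
    (∀ j, p < j → j ≤ i → pvAt pivot j = none) → pf pivot i = pf pivot p := by
  intro i
  induction i with
  | zero => intro h _; interval_cases p; rfl
  | succ i ih =>
    intro h hnone
    rcases Nat.lt_or_ge p (i + 1) with hlt | hge
    · rw [pf, if_pos (hnone (i + 1) (by omega) le_rfl)]
      exact ih (by omega) (fun j h1 h2 => hnone j h1 (by omega))
    · have : p = i + 1 := by omega
      rw [this]

lemma pf_zero (pivot : List (Option Int)) : ∀ (i : Nat),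
    (∀ j, j ≤ i → pvAt pivot j = none) → pf pivot i = 0 := by
  intro i
  induction i with
  | zero => intro _; rfl
  | succ i ih =>
    intro h
    rw [pf, if_pos (h (i + 1) le_rfl)]
    exact ih (fun j hj => h j (by omega))

lemma pvAt_out (pivot : List (Option Int)) (i : Nat) (h : pivot.length ≤ i) :
    pvAt pivot i = none := by
  rw [pvAt, List.getD_eq_getElem?_getD, List.getElem?_eq_none (by simpa using h)]
  rfl

lemma nf_zero (pivot : List (Option Int)) (n : Nat) (hn : n = pivot.length) : ∀ (i : Nat),
    (∀ j, i ≤ j → j < n → pvAt pivot j = none) → nf pivot n i = 0 := by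
  intro i
  induction hi : n - i generalizing i with
  | zero =>
    intro h
    have hni : pvAt pivot i = none := by
      rcases Nat.lt_or_ge i n with hlt | hge
      · exact h i le_rfl hlt
      · exact pvAt_out pivot i (by omega)
    rw [nf, if_neg (by simpa using hni), if_neg (by omega)]
  | succ d ih =>
    intro h
    rcases Nat.lt_or_ge i (n - 1) with hlt | hge
    · have hni : pvAt pivot i = none := h i le_rfl (by omega)
      rw [nf, if_neg (by simpa using hni), if_pos hlt]
      exact ih (i + 1) (by omega) (fun j h1 h2 => h j (by omega) h2)
    · have hni : pvAt pivot i = none := by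
        rcases Nat.lt_or_ge i n with hlt' | hge'
        · exact h i le_rfl hlt'
        · exact pvAt_out pivot i (by omega)
      rw [nf, if_neg (by simpa using hni), if_neg (by omega)]

lemma nf_next (pivot : List (Option Int)) (n q : Nat) (hq : q < n)
    (hqp : pvf pivot q = true) : ∀ (i : Nat), i ≤ q →
    (∀ j, i ≤ j → j < q → pvAt pivot j = none) → nf pivot n i = (q : Int) := by
  intro i
  induction hi : q - i generalizing i with
  | zero =>
    intro h1 _
    have : i = q := by omega
    subst this
    rw [nf, if_pos (by simpa [pvf, Option.isSome_iff_ne_none] using hqp)]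
  | succ d ih =>
    intro h1 hnone
    have hiq : i < q := by omega
    have hni : pvAt pivot i = none := hnone i le_rfl hiq
    rw [nf, if_neg (by simpa using hni), if_pos (by omega)]
    exact ih (i + 1) (by omega) (by omega) (fun j hj1 hj2 => hnone j (by omega) hj2)

lemma map_const_range' (g : Nat → Int) (a m : Nat) (c : Int)
    (h : ∀ j, a ≤ j → j < a + m → g j = c) :
    (List.range' a m).map g = List.replicate m c := by
  rw [List.eq_replicate_iff]
  constructor
  · simp
  · intro b hb
    obtain ⟨j, hj, rfl⟩ := List.mem_map.mp hb
    obtain ⟨h1, h2⟩ := List.mem_range'_1.mp hj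
    exact h j h1 h2

-- glue two ranges (step 1) without the 1 * _ normal form getting in the way
lemma range'_glue (a b c : Nat) (hab : a ≤ b) (hbc : b ≤ c) :
    List.range' a (b - a) ++ List.range' b (c - b) = List.range' a (c - a) := by
  have h := List.range'_append (s := a) (m := b - a) (n := c - b) (step := 1)
  rw [show a + 1 * (b - a) = b from by omega, show (b - a) + (c - b) = c - a from by omega] at h
  exact h

lemma prevBlocks_eq (pivot : List (Option Int)) (n : Nat) (hn : n = pivot.length) :
    ∀ (m : Nat) (p : Nat), pvf pivot p = true → p + m = n → 1 ≤ m →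
    prevBlocks n ((List.range' p m).filter (pvf pivot)) = (List.range' p m).map (pf pivot) := by
  intro m
  induction m using Nat.strong_induction_on with
  | _ m ih =>
    intro p hp hpm hm
    have hsplit1 : (List.range' p m).filter (pvf pivot) =
        p :: (List.range' (p + 1) (m - 1)).filter (pvf pivot) := by
      obtain ⟨m', rfl⟩ : ∃ m', m = m' + 1 := ⟨m - 1, by omega⟩
      rw [List.range'_succ, List.filter_cons, if_pos hp]
      simp
    rw [hsplit1]
    rcases filter_range'_split (pvf pivot) (m - 1) (p + 1) with hrest | ⟨d, hd, hnone, hfd, heq⟩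
    · rw [hrest, prevBlocks]
      rw [show n - p = m from by omega]
      symm
      apply map_const_range' _ _ _ _
      intro j h1 h2
      rw [pf_const pivot p j h1 (fun j' hj1 hj2 =>
        filter_empty_none pivot (p + 1) (m - 1) hrest j' (by omega) (by omega)),
        pf_pivot pivot p hp]
    · have hnone' : ∀ j', p < j' → j' < p + 1 + d → pvAt pivot j' = none := by
        intro j' hj1 hj2
        have := hnone (j' - (p + 1)) (by omega)
        rw [show p + 1 + (j' - (p + 1)) = j' from by omega] at this
        simpa [pvf, Option.isSome_iff_ne_none] using this
      rw [heq, prevBlocks]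
      have hrest2 : (List.range' (p + 1 + d) (m - 1 - d)).filter (pvf pivot) =
          (p + 1 + d) :: (List.range' (p + 1 + d + 1) (m - 1 - d - 1)).filter (pvf pivot) := by
        rw [show m - 1 - d = (m - 1 - d - 1) + 1 from by omega, List.range'_succ,
          List.filter_cons, if_pos hfd]
        simp only [Nat.add_sub_cancel]
      have hih := ih (m - 1 - d) (by omega) (p + 1 + d) hfd (by omega) (by omega)
      rw [hrest2] at hih
      rw [hih]
      have hsplitr := range'_glue p (p + 1 + d) (p + m) (by omega) (by omega)
      rw [show p + 1 + d - p = d + 1 from by omega, show p + m - p = m from by omega,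
        show p + m - (p + 1 + d) = m - 1 - d from by omega] at hsplitr
      rw [← hsplitr, List.map_append]
      congr 1
      · symm
        rw [show (p + 1 + d : Nat) - p = d + 1 from by omega]
        apply map_const_range' _ _ _ _
        intro j h1 h2
        rw [pf_const pivot p j h1 (fun j' hj1 hj2 => hnone' j' hj1 (by omega)),
          pf_pivot pivot p hp]

lemma nextBlocks_eq (pivot : List (Option Int)) (n : Nat) (hn : n = pivot.length) :
    ∀ (m : Nat) (p : Nat), pvf pivot p = true → p + m = n → 1 ≤ m →
    nextBlocks n ((List.range' p m).filter (pvf pivot)) =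
      (List.range' (p + 1) (m - 1)).map (nf pivot n) := by
  intro m
  induction m using Nat.strong_induction_on with
  | _ m ih =>
    intro p hp hpm hm
    have hsplit1 : (List.range' p m).filter (pvf pivot) =
        p :: (List.range' (p + 1) (m - 1)).filter (pvf pivot) := by
      obtain ⟨m', rfl⟩ : ∃ m', m = m' + 1 := ⟨m - 1, by omega⟩
      rw [List.range'_succ, List.filter_cons, if_pos hp]
      simp
    rw [hsplit1]
    rcases filter_range'_split (pvf pivot) (m - 1) (p + 1) with hrest | ⟨d, hd, hnone, hfd, heq⟩
    · rw [hrest, nextBlocks]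
      rw [show n - 1 - p = m - 1 from by omega]
      symm
      apply map_const_range' _ _ _ _
      intro j h1 h2
      exact nf_zero pivot n (by omega) j (fun j' hj1 hj2 =>
        filter_empty_none pivot (p + 1) (m - 1) hrest j' (by omega) (by omega))
    · have hnone' : ∀ j', p < j' → j' < p + 1 + d → pvAt pivot j' = none := by
        intro j' hj1 hj2
        have := hnone (j' - (p + 1)) (by omega)
        rw [show p + 1 + (j' - (p + 1)) = j' from by omega] at this
        simpa [pvf, Option.isSome_iff_ne_none] using this
      rw [heq, nextBlocks]
      have hrest2 : (List.range' (p + 1 + d) (m - 1 - d)).filter (pvf pivot) =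
          (p + 1 + d) :: (List.range' (p + 1 + d + 1) (m - 1 - d - 1)).filter (pvf pivot) := by
        rw [show m - 1 - d = (m - 1 - d - 1) + 1 from by omega, List.range'_succ,
          List.filter_cons, if_pos hfd]
        simp only [Nat.add_sub_cancel]
      have hih := ih (m - 1 - d) (by omega) (p + 1 + d) hfd (by omega) (by omega)
      rw [hrest2] at hih
      rw [hih]
      have hsplitr := range'_glue (p + 1) (p + 1 + d + 1) (p + m) (by omega) (by omega)
      rw [show p + 1 + d + 1 - (p + 1) = d + 1 from by omega,
        show p + m - (p + 1) = m - 1 from by omega,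
        show p + m - (p + 1 + d + 1) = m - 1 - d - 1 from by omega] at hsplitr
      rw [← hsplitr, List.map_append]
      congr 1
      · symm
        rw [show (p + 1 + d : Nat) - p = d + 1 from by omega]
        apply map_const_range' _ _ _ _
        intro j h1 h2
        apply nf_next pivot n (p + 1 + d) (by omega) hfd j (by omega)
        intro j' hj1 hj2
        exact hnone' j' (by omega) hj2

-- ===== VERDICT (by name: the statement is the Claim_ definition above) =====
theorem calculate_pivot_indexes_spec : Claim_equal_calculate_pivot_indexes := by
  intro pivot _
  show _ = _
  have hA : calculate_pivot_indexes pivot =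
      ((List.range pivot.length).map (pf pivot),
       (List.range pivot.length).map (nf pivot pivot.length)) := by
    have h1 := fwd_inv pivot pivot.length le_rfl
    have h2 := back_inv pivot pivot.length le_rfl
    simp only [calculate_pivot_indexes]
    rw [h1]
    simpa using h2
  rw [hA, calculate_pivot_indexes_alt]
  rcases hcase : pivotIdxs pivot with _ | ⟨p0, rest⟩
  · -- no pivots at all: both arrays are all zeros
    rw [pivotIdxs_eq] at hcase
    have hnone := filter_empty_none pivot 0 pivot.length hcase
    have h1 : (List.range pivot.length).map (pf pivot) =
        List.replicate pivot.length (0 : Int) := by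
      rw [List.range_eq_range']
      apply map_const_range'
      intro j hj1 hj2
      exact pf_zero pivot j (fun j' hj => hnone j' (by omega) (by omega))
    have h2 : (List.range pivot.length).map (nf pivot pivot.length) =
        List.replicate pivot.length (0 : Int) := by
      rw [List.range_eq_range']
      apply map_const_range'
      intro j hj1 hj2
      exact nf_zero pivot pivot.length rfl j (fun j' hj1 hj2 => hnone j' (by omega) (by omega))
    rw [h1, h2]
  · rw [pivotIdxs_eq] at hcase
    rcases filter_range'_split (pvf pivot) pivot.length 0 with hrest | ⟨d, hd, hnone, hfd, heq⟩
    · rw [hrest] at hcase; exact absurd hcase (by simp)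
    · rw [heq] at hcase
      simp only [Nat.zero_add] at hcase hfd hnone
      obtain ⟨hp0, hrest0⟩ := (List.cons.injEq _ _ _ _).mp hcase
      subst hp0
      have hnone' : ∀ j', j' < d → pvAt pivot j' = none := by
        intro j' hj
        have := hnone j' hj
        simpa [pvf, Option.isSome_iff_ne_none] using this
      have hfull : (List.range' d (pivot.length - d)).filter (pvf pivot) =
          d :: (List.range' (d + 1) (pivot.length - d - 1)).filter (pvf pivot) := by
        rw [show pivot.length - d = (pivot.length - d - 1) + 1 from by omega,
          List.range'_succ, List.filter_cons, if_pos hfd]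
        simp only [Nat.add_sub_cancel]
      have hprev := prevBlocks_eq pivot pivot.length rfl (pivot.length - d) d hfd
        (by omega) (by omega)
      have hnext := nextBlocks_eq pivot pivot.length rfl (pivot.length - d) d hfd
        (by omega) (by omega)
      rw [hfull] at hprev hnext
      rw [show pivot.length - d - 1 = pivot.length - (d + 1) from by omega] at hprev hnext
      rw [show pivot.length - d - 1 = pivot.length - (d + 1) from by omega] at hrest0
      rw [hrest0] at hprev hnext
      have hP : (List.range pivot.length).map (pf pivot) =
          List.replicate d (0 : Int) ++ prevBlocks pivot.length (d :: rest) := by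
        rw [hprev]
        have hhead : (List.range' 0 d).map (pf pivot) = List.replicate d (0 : Int) := by
          apply map_const_range'
          intro j hj1 hj2
          exact pf_zero pivot j (fun j' hj => hnone' j' (by omega))
        rw [← hhead, ← List.map_append]
        have hglue := range'_glue 0 d pivot.length (by omega) (by omega)
        simp only [Nat.sub_zero] at hglue
        rw [hglue, List.range_eq_range']
      have hQ : (List.range pivot.length).map (nf pivot pivot.length) =
          List.replicate (d + 1) (d : Int) ++ nextBlocks pivot.length (d :: rest) := by
        rw [hnext]
        have hhead : (List.range' 0 (d + 1)).map (nf pivot pivot.length) =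
            List.replicate (d + 1) (d : Int) := by
          apply map_const_range'
          intro j hj1 hj2
          exact nf_next pivot pivot.length d (by omega) hfd j (by omega)
            (fun j' hj1 hj2 => hnone' j' hj2)
        rw [← hhead, ← List.map_append]
        have hglue := range'_glue 0 (d + 1) pivot.length (by omega) (by omega)
        simp only [Nat.sub_zero] at hglue
        rw [hglue, List.range_eq_range']
      rw [hP, hQ]
      exact (blocks_bridge pivot.length rest d (List.replicate d 0) (List.replicate (d + 1) (d : Int))).symm
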